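-- pv_equiv track=rewrite | github.com/Ava-Prime/gitguard | mcp/servers/gitguard_policy.py | _extract_rule_description
-- ===== SOURCE A (Python) =====
-- def _extract_rule_description(lines: list[str], rule_line: int) -> str:
--     """Extract description from comments above the rule."""
--     description_lines = []
--     i = rule_line - 1
--
--     while i >= 0 and (lines[i].strip().startswith("#") or lines[i].strip() == ""):
--         if lines[i].strip().startswith("#"):
--             description_lines.insert(0, lines[i].strip()[1:].strip())
--         i -= 1
--
--     return " ".join(description_lines) if description_lines else "No description available"
-- ===== SOURCE B (Python) =====
-- def _extract_rule_description(lines: list[str], rule_line: int) -> str: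
--     """Extract description from comments above the rule."""
--     # Phase 1: scan upward to find the boundary of the comment/blank block.
--     start = rule_line
--     while start > 0:
--         stripped = lines[start - 1].strip()
--         if stripped.startswith("#") or stripped == "":
--             start -= 1
--         else:
--             break
--     # Phase 2: forward pass over the block, keeping only comment lines.
--     parts = [
--         s[1:].strip()
--         for line in lines[start:rule_line]
--         if (s := line.strip()).startswith("#")
--     ]
--     return " ".join(parts) if parts else "No description available"
-- ===== Notes on version B (the rewrite author's own statement) =====
-- stated objective: alternative
-- what changed: Replaces the single backward loop with quadratic insert(0) by a boundary scan upward plus a forward filtering comprehension over the slice, joined once.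
import Mathlib
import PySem

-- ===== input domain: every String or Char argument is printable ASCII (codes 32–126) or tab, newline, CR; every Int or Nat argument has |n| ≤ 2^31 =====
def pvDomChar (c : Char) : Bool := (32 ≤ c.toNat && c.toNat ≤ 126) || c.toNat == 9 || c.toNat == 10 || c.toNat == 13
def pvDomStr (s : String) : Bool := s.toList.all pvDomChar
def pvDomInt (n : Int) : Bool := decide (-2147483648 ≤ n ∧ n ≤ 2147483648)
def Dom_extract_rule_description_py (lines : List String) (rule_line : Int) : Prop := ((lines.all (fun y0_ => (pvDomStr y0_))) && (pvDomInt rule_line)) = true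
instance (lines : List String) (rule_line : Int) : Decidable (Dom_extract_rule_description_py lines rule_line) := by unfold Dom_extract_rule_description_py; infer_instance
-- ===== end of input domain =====

-- B changes the decomposition: a boundary scan upward plus one forward filtering pass replaces
-- A's backward loop that repeatedly prepends with insert(0). Return values agree on all of Pre_.

-- ===== PORT A =====
-- A's while loop, index descending from i to 0; lines[i] is read via getD, exact because
-- Pre_ guarantees every index visited is in range (the loop starts at rule_line-1 < lines.length).
def pvLoopA (lines : List String) : Nat → List String → List String
  | i, desc =>
    let s := PySem.Str.strip (lines.getD i "")
    if PySem.Str.startswith s "#" || s == "" then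
      let desc' := if PySem.Str.startswith s "#"
                   then PySem.Str.strip (PySem.Str.slice s (some 1) none) :: desc
                   else desc
      match i with
      | 0 => desc'
      | j + 1 => pvLoopA lines j desc'
    else desc

def extract_rule_description_py (lines : List String) (rule_line : Int) : String :=
  -- i = rule_line - 1; if i < 0 the while loop never runs
  let desc := if rule_line - 1 < 0 then [] else pvLoopA lines (rule_line - 1).toNat []
  match desc with
  | [] => "No description available"
  | _ => PySem.Str.join " " desc

-- ===== PORT B =====
-- B's phase-1 boundary scan: while start > 0 and lines[start-1] is comment/blank, start -= 1.
def pvBoundB (lines : List String) : Nat → Nat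
  | 0 => 0
  | k + 1 =>
    let s := PySem.Str.strip (lines.getD k "")
    if PySem.Str.startswith s "#" || s == "" then pvBoundB lines k else k + 1

-- B's phase-2 comprehension over the slice.
def pvCommB (seg : List String) : List String :=
  seg.filterMap (fun line =>
    let s := PySem.Str.strip line
    if PySem.Str.startswith s "#"
    then some (PySem.Str.strip (PySem.Str.slice s (some 1) none))
    else none)

def extract_rule_description_py_alt (lines : List String) (rule_line : Int) : String :=
  let start := pvBoundB lines rule_line.toNat
  -- lines[start:rule_line]: exact as take/drop since 0 ≤ start ≤ rule_line here
  -- (and for rule_line ≤ 0 both the Python slice and this expression are empty)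
  let parts := pvCommB ((lines.take rule_line.toNat).drop start)
  if parts.isEmpty then "No description available" else PySem.Str.join " " parts

-- ===== PRECONDITION & SPEC =====
-- Pre_ excludes exactly the inputs where Python A raises IndexError: rule_line - 1 ≥ len(lines).
def Pre_extract_rule_description_py (lines : List String) (rule_line : Int) : Prop :=
  rule_line ≤ (lines.length : Int)
instance (lines : List String) (rule_line : Int) : Decidable (Pre_extract_rule_description_py lines rule_line) := by unfold Pre_extract_rule_description_py; infer_instance

def pvWitness_extract_rule_description_py : List String × Int := (["# Checks size", "rule_max_size"], 1)

def Spec_extract_rule_description_py (lines : List String) (rule_line : Int) (out : String) : Prop := out = extract_rule_description_py_alt lines rule_line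
instance (lines : List String) (rule_line : Int) (out : String) : Decidable (Spec_extract_rule_description_py lines rule_line out) := by unfold Spec_extract_rule_description_py; infer_instance

-- ===== CLAIM (what is proved, stated in full; the proofs are below) =====
def Claim_equal_extract_rule_description_py : Prop := ∀ (lines : List String) (rule_line : Int), Dom_extract_rule_description_py lines rule_line → Pre_extract_rule_description_py lines rule_line → Spec_extract_rule_description_py lines rule_line (extract_rule_description_py lines rule_line)

-- ===== LEMMAS AND PROOFS =====

lemma pvBoundB_le (lines : List String) : ∀ n, pvBoundB lines n ≤ n := by
  intro n
  induction n with
  | zero => simp [pvBoundB]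
  | succ k ih =>
    simp only [pvBoundB]
    split
    · omega
    · omega

lemma pvCommB_append (u v : List String) : pvCommB (u ++ v) = pvCommB u ++ pvCommB v := by
  simp [pvCommB, List.filterMap_append]

-- one-step unfoldings of A's loop (definitional)
lemma pvLoopA_zero (lines : List String) (desc : List String) :
    pvLoopA lines 0 desc =
      if PySem.Str.startswith (PySem.Str.strip (lines.getD 0 "")) "#"
          || PySem.Str.strip (lines.getD 0 "") == "" then
        (if PySem.Str.startswith (PySem.Str.strip (lines.getD 0 "")) "#"
         then PySem.Str.strip (PySem.Str.slice (PySem.Str.strip (lines.getD 0 "")) (some 1) none) :: desc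
         else desc)
      else desc := rfl

lemma pvLoopA_succ (lines : List String) (j : Nat) (desc : List String) :
    pvLoopA lines (j + 1) desc =
      if PySem.Str.startswith (PySem.Str.strip (lines.getD (j + 1) "")) "#"
          || PySem.Str.strip (lines.getD (j + 1) "") == "" then
        pvLoopA lines j
          (if PySem.Str.startswith (PySem.Str.strip (lines.getD (j + 1) "")) "#"
           then PySem.Str.strip (PySem.Str.slice (PySem.Str.strip (lines.getD (j + 1) "")) (some 1) none) :: desc
           else desc)
      else desc := rfl

-- pvCommB on a single in-range line is exactly one loop step's contribution
lemma pvCommB_singleton (l : String) :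
    pvCommB [l] =
      if PySem.Str.startswith (PySem.Str.strip l) "#"
      then [PySem.Str.strip (PySem.Str.slice (PySem.Str.strip l) (some 1) none)]
      else [] := by
  simp only [pvCommB, List.filterMap]
  split <;> simp_all

-- the loop invariant: A's backward accumulation equals B's forward filter over the block
lemma pvLoopA_eq (lines : List String) : ∀ (i : Nat) (desc : List String),
    pvLoopA lines i desc
      = pvCommB ((lines.take (i + 1)).drop (pvBoundB lines (i + 1))) ++ desc := by
  intro i
  induction i with
  | zero =>
    intro desc
    rw [pvLoopA_zero]
    by_cases hcond : (PySem.Str.startswith (PySem.Str.strip (lines.getD 0 "")) "#"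
        || PySem.Str.strip (lines.getD 0 "") == "") = true
    · rw [if_pos hcond]
      have hb : pvBoundB lines 1 = 0 := by
        simp only [pvBoundB]
        rw [if_pos hcond]
      rw [hb, List.drop_zero]
      by_cases hlen : 0 < lines.length
      · have htake : lines.take 1 = [lines[0]] := by
          rw [List.take_add_one, List.take_zero, List.getElem?_eq_getElem hlen]
          rfl
        have hget : lines.getD 0 "" = lines[0] := by
          simp [List.getD, List.getElem?_eq_getElem hlen]
        rw [htake, pvCommB_singleton, ← hget]
        split_ifs <;> simp
      · have hnil : lines = [] := by
          cases lines with
          | nil => rfl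
          | cons a t => simp at hlen
        subst hnil
        have hcom : PySem.Str.startswith (PySem.Str.strip (([] : List String).getD 0 "")) "#" = false := by
          decide
        rw [hcom]
        simp [pvCommB]
    · rw [if_neg hcond]
      have hb : pvBoundB lines 1 = 1 := by
        simp only [pvBoundB]
        rw [if_neg hcond]
      rw [hb]
      have hdrop : (lines.take 1).drop 1 = [] := by
        apply List.drop_eq_nil_of_le
        simp [List.length_take]
      rw [hdrop]
      simp [pvCommB]
  | succ j ih =>
    intro desc
    rw [pvLoopA_succ]
    by_cases hcond : (PySem.Str.startswith (PySem.Str.strip (lines.getD (j + 1) "")) "#"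
        || PySem.Str.strip (lines.getD (j + 1) "") == "") = true
    · rw [if_pos hcond, ih]
      have hb : pvBoundB lines (j + 2) = pvBoundB lines (j + 1) := by
        simp only [pvBoundB]
        rw [if_pos hcond]
      rw [hb]
      have hble : pvBoundB lines (j + 1) ≤ j + 1 := pvBoundB_le lines (j + 1)
      by_cases hlen : j + 1 < lines.length
      · have htake : lines.take (j + 2) = lines.take (j + 1) ++ [lines[j + 1]] := by
          rw [List.take_add_one, List.getElem?_eq_getElem hlen]
          rfl
        have hlen' : (lines.take (j + 1)).length = j + 1 := by
          simp [List.length_take]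
          omega
        have hget : lines.getD (j + 1) "" = lines[j + 1] := by
          simp [List.getD, List.getElem?_eq_getElem hlen]
        rw [htake, List.drop_append_of_le_length (by omega), pvCommB_append,
            pvCommB_singleton, ← hget]
        split_ifs <;> simp
      · have hget : lines.getD (j + 1) "" = "" := by
          simp [List.getD, List.getElem?_eq_none (by omega : lines.length ≤ j + 1)]
        have hcom : PySem.Str.startswith (PySem.Str.strip (lines.getD (j + 1) "")) "#" = false := by
          rw [hget]
          decide
        have htake : lines.take (j + 2) = lines.take (j + 1) := by
          rw [List.take_of_length_le (by omega), List.take_of_length_le (by omega)]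
        rw [htake, hcom]
        simp
    · rw [if_neg hcond]
      have hb : pvBoundB lines (j + 2) = j + 2 := by
        simp only [pvBoundB]
        rw [if_neg hcond]
      rw [hb]
      have hdrop : (lines.take (j + 2)).drop (j + 2) = [] := by
        apply List.drop_eq_nil_of_le
        simp [List.length_take]
      rw [hdrop]
      simp [pvCommB]

-- ===== VERDICT (by name: the statement is the Claim_ definition above) =====
theorem extract_rule_description_py_spec : Claim_equal_extract_rule_description_py := by
  intro lines rule_line _hdom _hpre
  unfold Spec_extract_rule_description_py extract_rule_description_py extract_rule_description_py_alt
  by_cases hneg : rule_line - 1 < 0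
  · have h0 : rule_line.toNat = 0 := by omega
    simp [hneg, h0, pvBoundB, pvCommB]
  · have hpos : 1 ≤ rule_line := by omega
    have h1 : rule_line.toNat = (rule_line - 1).toNat + 1 := by omega
    simp only [hneg, if_false, h1]
    rw [pvLoopA_eq, List.append_nil]
    cases pvCommB ((lines.take ((rule_line - 1).toNat + 1)).drop (pvBoundB lines ((rule_line - 1).toNat + 1))) with
    | nil => simp
    | cons a t => simp
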